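-- pv_equiv track=rewrite | github.com/decisionenabler-sk/python-de-practice | plaid_coding.py | create_routing_number_mappings
-- ===== SOURCE A (Python) =====
-- from collections import defaultdict
-- from typing import Dict, List, Tuple
--
-- def create_routing_number_mappings(rn_bank_name: List[Dict[str, str]], name_to_bank_id: List[Tuple[str, int]]) -> Dict[str, List[int]]:
--     output = defaultdict(list)
--     banks = defaultdict(list)
--     for nums in rn_bank_name:
--         for rn,name in nums.items():
--             banks[rn].append(name)
--     for rn,names in banks.items():
--         for bank in name_to_bank_id:
--             if bank[0] in names:
--                 output[rn].append(bank[1])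
--     return dict(output)
-- ===== SOURCE B (Python) =====
-- from collections import defaultdict
-- from typing import Dict, List, Tuple
--
-- def create_routing_number_mappings(rn_bank_name: List[Dict[str, str]], name_to_bank_id: List[Tuple[str, int]]) -> Dict[str, List[int]]:
--     # inverted index: bank name -> set of routing numbers carrying it; rn_order keeps first-seen rn order
--     rns_by_name = defaultdict(set)
--     rn_order = {}
--     for nums in rn_bank_name:
--         for rn, name in nums.items():
--             rns_by_name[name].add(rn)
--             rn_order[rn] = None
--     out = defaultdict(list)
--     for name, bank_id in name_to_bank_id:
--         for rn in rns_by_name.get(name, ()):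
--             out[rn].append(bank_id)
--     return {rn: out[rn] for rn in rn_order if rn in out}
-- ===== Notes on version B (the rewrite author's own statement) =====
-- stated objective: faster
-- what changed: B replaces A's per-routing-number membership rescan of the whole bank list against a list of names by an inverted bank-name -> set-of-routing-numbers index driven by a single pass over the bank list, with a final ordered dict comprehension restoring first-seen routing-number order.
import Mathlib
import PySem

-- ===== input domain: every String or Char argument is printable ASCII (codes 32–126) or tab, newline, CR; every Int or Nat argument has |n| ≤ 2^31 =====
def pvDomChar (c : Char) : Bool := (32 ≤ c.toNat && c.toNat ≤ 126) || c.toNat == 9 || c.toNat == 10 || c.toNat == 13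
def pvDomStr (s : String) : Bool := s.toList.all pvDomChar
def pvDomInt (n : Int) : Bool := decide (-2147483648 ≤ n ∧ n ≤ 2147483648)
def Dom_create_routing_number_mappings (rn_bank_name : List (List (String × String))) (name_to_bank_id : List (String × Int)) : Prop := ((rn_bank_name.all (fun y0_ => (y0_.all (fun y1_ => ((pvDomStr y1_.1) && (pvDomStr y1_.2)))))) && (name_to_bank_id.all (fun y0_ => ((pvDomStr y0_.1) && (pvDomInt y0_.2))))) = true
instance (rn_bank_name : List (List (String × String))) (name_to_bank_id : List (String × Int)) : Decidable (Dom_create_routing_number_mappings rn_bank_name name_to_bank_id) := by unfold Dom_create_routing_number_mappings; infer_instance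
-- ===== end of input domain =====

-- B replaces A's per-routing-number rescan of the whole bank list by an inverted name→routing-numbers index
-- driven by a single pass over the bank list (objective: faster).

-- ===== PORT A =====
def create_routing_number_mappings (rn_bank_name : List (List (String × String))) (name_to_bank_id : List (String × Int)) : List (String × List Int) :=
  -- banks = defaultdict(list); for nums in rn_bank_name: for rn, name in nums.items(): banks[rn].append(name)
  let banks : PySem.Dict String (List String) :=
    rn_bank_name.foldl (fun banks nums =>
      nums.foldl (fun banks p => banks.modify p.1 [] (fun l => l ++ [p.2])) banks) PySem.Dict.empty
  -- output = defaultdict(list); for rn, names in banks.items(): for bank in name_to_bank_id: if bank[0] in names: output[rn].append(bank[1])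
  let output : PySem.Dict String (List Int) :=
    banks.items.foldl (fun output pr =>
      name_to_bank_id.foldl (fun output bank =>
        if pr.2.contains bank.1 then output.modify pr.1 [] (fun l => l ++ [bank.2]) else output) output)
      PySem.Dict.empty
  output.items

-- ===== PORT B =====
def create_routing_number_mappings_alt (rn_bank_name : List (List (String × String))) (name_to_bank_id : List (String × Int)) : List (String × List Int) :=
  -- rns_by_name = defaultdict(set); rn_order = {}; one pass filling both
  let st : PySem.Dict String (PySem.Set String) × PySem.Set String :=
    rn_bank_name.foldl (fun st nums =>
      nums.foldl (fun st p =>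
        (st.1.modify p.2 PySem.Set.empty (fun s => PySem.Set.add s p.1), PySem.Set.add st.2 p.1)) st)
      (PySem.Dict.empty, PySem.Set.empty)
  -- out = defaultdict(list); for name, bank_id in name_to_bank_id: for rn in rns_by_name.get(name, ()): out[rn].append(bank_id)
  let out : PySem.Dict String (List Int) :=
    name_to_bank_id.foldl (fun out bank =>
      (st.1.getD bank.1 PySem.Set.empty).foldl (fun out rn => out.modify rn [] (fun l => l ++ [bank.2])) out)
      PySem.Dict.empty
  -- return {rn: out[rn] for rn in rn_order if rn in out}
  st.2.filterMap (fun rn => (out.get? rn).map (fun v => (rn, v)))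

-- ===== PRECONDITION & SPEC =====
def Spec_create_routing_number_mappings (rn_bank_name : List (List (String × String))) (name_to_bank_id : List (String × Int)) (out : List (String × List Int)) : Prop := out = create_routing_number_mappings_alt rn_bank_name name_to_bank_id
instance (rn_bank_name : List (List (String × String))) (name_to_bank_id : List (String × Int)) (out : List (String × List Int)) : Decidable (Spec_create_routing_number_mappings rn_bank_name name_to_bank_id out) := by unfold Spec_create_routing_number_mappings; infer_instance

-- ===== CLAIM (what is proved, stated in full; the proofs are below) =====
def Claim_equal_create_routing_number_mappings : Prop := ∀ (rn_bank_name : List (List (String × String))) (name_to_bank_id : List (String × Int)), Dom_create_routing_number_mappings rn_bank_name name_to_bank_id → Spec_create_routing_number_mappings rn_bank_name name_to_bank_id (create_routing_number_mappings rn_bank_name name_to_bank_id)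

-- ===== LEMMAS AND PROOFS =====

-- all (rn, name) pairs in occurrence order
def pvPairs (rn_bank_name : List (List (String × String))) : List (String × String) := rn_bank_name.flatten

-- names appended to banks[rn] by A, in order
def pvNamesFor (P : List (String × String)) (rn : String) : List String :=
  (P.filter (fun p => p.1 == rn)).map (·.2)

-- B's inverted index entry for a name
def pvRnsFor (P : List (String × String)) (name : String) : List String :=
  (P.filter (fun p => p.2 == name)).map (·.1)

-- the id list a routing number with name list `names` receives
def pvIds (name_to_bank_id : List (String × Int)) (names : List String) : List Int :=
  (name_to_bank_id.filter (fun b => names.contains b.1)).map (·.2)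

def pvOptIds (l : List Int) : Option (List Int) := if l = [] then none else some l


-- modify with a default is an insert of the updated value (definitional; used to rewrite loops)
theorem pvModify_eq_insert {v : Type} (d : PySem.Dict String v) (k : String) (dflt : v) (f : v → v) :
    d.modify k dflt f = d.insert k (f (d.getD k dflt)) := rfl

theorem pvSetContains_iff {T : Type} [BEq T] [LawfulBEq T] (s : PySem.Set T) (x : T) :
    PySem.Set.contains s x = true ↔ x ∈ s := by simp [PySem.Set.contains]

-- ---- A-side characterisation ----

theorem pvBanks_eq (rn_bank_name : List (List (String × String))) :
    rn_bank_name.foldl (fun banks nums =>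
      nums.foldl (fun banks p => banks.modify p.1 [] (fun l => l ++ [p.2])) banks) PySem.Dict.empty
    = (pvPairs rn_bank_name).foldl (fun banks p => banks.modify p.1 [] (fun l => l ++ [p.2])) PySem.Dict.empty := by
  simp [pvPairs, List.foldl_flatten]

theorem pvBanks_getD (P : List (String × String)) (rn : String) :
    (P.foldl (fun banks p => banks.modify p.1 [] (fun l => l ++ [p.2])) PySem.Dict.empty).getD rn []
      = pvNamesFor P rn := by
  simp [PySem.Dict.getD_foldl_modify_append, pvNamesFor]

theorem pvBanks_keys (P : List (String × String)) :
    (P.foldl (fun banks p => banks.modify p.1 [] (fun l => l ++ [p.2])) PySem.Dict.empty).keys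
      = PySem.Set.ofList (P.map (·.1)) := by
  rw [PySem.Dict.keys_foldl_modify_key P (·.1) [] (fun _ p => (fun l => l ++ [p.2])) PySem.Dict.empty]
  rfl

theorem pvBanks_nodup (P : List (String × String)) :
    (P.foldl (fun banks p => banks.modify p.1 [] (fun l => l ++ [p.2])) PySem.Dict.empty).keys.Nodup := by
  exact PySem.Dict.nodup_keys_foldl_modify_key P (·.1) [] (fun _ p => (fun l => l ++ [p.2])) PySem.Dict.empty (by simp)

-- a fold appending the elements of a nonempty list to a single key is one insert
theorem pvFoldAppendKey (bids : List Int) (rn : String) (d : PySem.Dict String (List Int)) (h : bids ≠ []) :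
    bids.foldl (fun d x => d.modify rn [] (fun l => l ++ [x])) d = d.insert rn (d.getD rn [] ++ bids) := by
  induction bids generalizing d with
  | nil => exact absurd rfl h
  | cons x xs ih =>
    by_cases hxs : xs = []
    · subst hxs; rfl
    · show xs.foldl _ (d.modify rn [] (fun l => l ++ [x])) = _
      rw [ih _ hxs]
      rw [pvModify_eq_insert, PySem.Dict.getD_insert_self, PySem.Dict.insert_insert_self,
        List.append_assoc]
      rfl

-- A's inner loop over the bank list, for one routing number
theorem pvInnerA (name_to_bank_id : List (String × Int)) (rn : String) (names : List String)
    (out : PySem.Dict String (List Int)) :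
    name_to_bank_id.foldl (fun out bank =>
        if names.contains bank.1 then out.modify rn [] (fun l => l ++ [bank.2]) else out) out
      = if pvIds name_to_bank_id names = [] then out
        else out.insert rn (out.getD rn [] ++ pvIds name_to_bank_id names) := by
  have h1 : name_to_bank_id.foldl (fun out bank =>
        if names.contains bank.1 then out.modify rn [] (fun l => l ++ [bank.2]) else out) out
      = (pvIds name_to_bank_id names).foldl (fun out x => out.modify rn [] (fun l => l ++ [x])) out := by
    rw [pvIds, List.foldl_map, List.foldl_filter]
  rw [h1]
  by_cases h : pvIds name_to_bank_id names = []
  · simp [h]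
  · rw [pvFoldAppendKey _ _ _ h, if_neg h]

-- A's outer loop over banks.items
theorem pvOuterA (name_to_bank_id : List (String × Int)) (items : List (String × List String))
    (out : PySem.Dict String (List Int))
    (hfresh : ∀ p ∈ items, out.contains p.1 = false)
    (hnd : (items.map (·.1)).Nodup) :
    (items.foldl (fun output pr =>
        name_to_bank_id.foldl (fun output bank =>
          if pr.2.contains bank.1 then output.modify pr.1 [] (fun l => l ++ [bank.2]) else output) output)
      out).items
    = out.items ++ items.filterMap (fun pr =>
        (pvOptIds (pvIds name_to_bank_id pr.2)).map (fun v => (pr.1, v))) := by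
  induction items generalizing out with
  | nil => simp
  | cons pr rest ih =>
    have hpr := hfresh pr (by simp)
    have hnd' : (rest.map (·.1)).Nodup := hnd.of_cons
    have hhead : pr.1 ∉ rest.map (·.1) := by
      have := hnd; simp only [List.map_cons, List.nodup_cons] at this; exact this.1
    have hfreshRest : ∀ p ∈ rest, out.contains p.1 = false :=
      fun p hp => hfresh p (List.mem_cons_of_mem _ hp)
    rw [List.foldl_cons, pvInnerA]
    by_cases hids : pvIds name_to_bank_id pr.2 = []
    · rw [if_pos hids, ih out hfreshRest hnd']
      simp [pvOptIds, hids]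
    · have hfreshRest2 : ∀ p ∈ rest,
          (out.insert pr.1 (out.getD pr.1 [] ++ pvIds name_to_bank_id pr.2)).contains p.1 = false := by
        intro p hp
        rw [PySem.Dict.contains_insert]
        have hne : p.1 ≠ pr.1 := fun hh => hhead (hh ▸ List.mem_map_of_mem hp)
        simp [hne, hfreshRest p hp]
      rw [if_neg hids, ih _ hfreshRest2 hnd']
      rw [PySem.Dict.items_insert_of_not_contains _ _ hpr,
        PySem.Dict.getD_of_not_contains _ _ hpr, List.nil_append]
      simp [pvOptIds, hids]

-- ---- B-side characterisation ----

theorem pvStB_eq (rn_bank_name : List (List (String × String))) :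
    rn_bank_name.foldl (fun st nums =>
      nums.foldl (fun st p =>
        (st.1.modify p.2 PySem.Set.empty (fun s => PySem.Set.add s p.1), PySem.Set.add st.2 p.1)) st)
      (PySem.Dict.empty, PySem.Set.empty)
    = ((pvPairs rn_bank_name).foldl (fun d p => d.modify p.2 PySem.Set.empty (fun s => PySem.Set.add s p.1)) PySem.Dict.empty,
       PySem.Set.ofList ((pvPairs rn_bank_name).map (·.1))) := by
  have h1 : rn_bank_name.foldl (fun st nums =>
      nums.foldl (fun st p =>
        (st.1.modify p.2 PySem.Set.empty (fun s => PySem.Set.add s p.1), PySem.Set.add st.2 p.1)) st)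
      (PySem.Dict.empty, PySem.Set.empty)
      = (pvPairs rn_bank_name).foldl (fun st p =>
        (st.1.modify p.2 PySem.Set.empty (fun s => PySem.Set.add s p.1), PySem.Set.add st.2 p.1))
        (PySem.Dict.empty, PySem.Set.empty) := by
    simp [pvPairs, List.foldl_flatten]
  have h2 : (pvPairs rn_bank_name).foldl (fun s p => PySem.Set.add s p.1) PySem.Set.empty
      = PySem.Set.ofList ((pvPairs rn_bank_name).map (·.1)) := by
    rw [PySem.Set.ofList_eq_foldl, List.foldl_map]; rfl
  rw [h1]
  exact (PySem.List.foldl_prod_mk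
    (fun (d : PySem.Dict String (PySem.Set String)) (p : String × String) =>
      d.modify p.2 PySem.Set.empty fun s => PySem.Set.add s p.1)
    (fun (s : PySem.Set String) (p : String × String) => PySem.Set.add s p.1)
    (pvPairs rn_bank_name) PySem.Dict.empty PySem.Set.empty).trans (by rw [h2])

theorem pvSetAddFold (l : List (String × String)) (d : PySem.Dict String (PySem.Set String)) (c : String) :
    (l.foldl (fun d p => d.modify p.2 PySem.Set.empty (fun s => PySem.Set.add s p.1)) d).getD c PySem.Set.empty
      = PySem.Set.update (d.getD c PySem.Set.empty) ((l.filter (fun p => p.2 == c)).map (·.1)) := by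
  induction l generalizing d with
  | nil => rfl
  | cons p l ih =>
    rw [List.foldl_cons, ih]
    by_cases h : p.2 = c
    · subst h
      rw [PySem.Dict.getD_modify_self]
      simp [PySem.Set.update]
    · rw [PySem.Dict.getD_modify_of_ne]
      · simp [h]
      · exact fun hc => h hc.symm

theorem pvRnsByName_getD (P : List (String × String)) (c : String) :
    (P.foldl (fun d p => d.modify p.2 PySem.Set.empty (fun s => PySem.Set.add s p.1)) PySem.Dict.empty).getD c PySem.Set.empty
      = PySem.Set.ofList (pvRnsFor P c) := by
  rw [pvSetAddFold]
  rfl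

theorem pvMembership (P : List (String × String)) (rn b1 : String) :
    (pvNamesFor P rn).contains b1 = PySem.Set.contains (PySem.Set.ofList (pvRnsFor P b1)) rn := by
  rw [Bool.eq_iff_iff]
  simp only [List.contains_iff_mem, pvSetContains_iff, PySem.Set.mem_ofList,
    pvNamesFor, pvRnsFor, List.mem_map, List.mem_filter, beq_iff_eq]
  constructor
  · rintro ⟨p, ⟨hp, h1⟩, h2⟩; exact ⟨p, ⟨hp, h2⟩, h1⟩
  · rintro ⟨p, ⟨hp, h2⟩, h1⟩; exact ⟨p, ⟨hp, h1⟩, h2⟩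

theorem pvPresB (S : List String) (x : Int) (d : PySem.Dict String (List Int)) (rn : String) (h : rn ∉ S) :
    (S.foldl (fun d r => d.modify r [] (fun l => l ++ [x])) d).get? rn = d.get? rn := by
  induction S generalizing d with
  | nil => rfl
  | cons s S ih =>
    have hne : rn ≠ s := fun hh => h (hh ▸ List.mem_cons_self ..)
    rw [List.foldl_cons, ih _ (fun hm => h (List.mem_cons_of_mem _ hm)), pvModify_eq_insert,
      PySem.Dict.get?_insert_of_ne _ _ hne]

theorem pvMemB (S : List String) (x : Int) (d : PySem.Dict String (List Int)) (rn : String)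
    (hnd : S.Nodup) (h : rn ∈ S) :
    (S.foldl (fun d r => d.modify r [] (fun l => l ++ [x])) d).get? rn = some (d.getD rn [] ++ [x]) := by
  induction S generalizing d with
  | nil => exact absurd h (List.not_mem_nil)
  | cons s S ih =>
    by_cases hs : rn = s
    · subst hs
      rw [List.foldl_cons, pvPresB _ _ _ _ ((List.nodup_cons.mp hnd).1), pvModify_eq_insert, PySem.Dict.get?_insert_self]
    · have hmem : rn ∈ S := by
        rcases List.mem_cons.1 h with h1 | h1
        · exact absurd h1 hs
        · exact h1
      rw [List.foldl_cons, ih _ hnd.of_cons hmem, pvModify_eq_insert, PySem.Dict.getD_insert_of_ne _ _ _ hs]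

-- B's accumulation loop over the bank list
theorem pvLoopB (P : List (String × String)) (bl : List (String × Int)) (f0 : String → List Int)
    (out : PySem.Dict String (List Int))
    (hinv : ∀ rn, out.get? rn = pvOptIds (f0 rn)) (rn : String) :
    (bl.foldl (fun out bank =>
        ((P.foldl (fun d p => d.modify p.2 PySem.Set.empty (fun s => PySem.Set.add s p.1)) PySem.Dict.empty).getD bank.1 PySem.Set.empty).foldl
          (fun out rn => out.modify rn [] (fun l => l ++ [bank.2])) out) out).get? rn
    = pvOptIds (f0 rn ++ (bl.filter (fun b => PySem.Set.contains (PySem.Set.ofList (pvRnsFor P b.1)) rn)).map (·.2)) := by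
  induction bl generalizing f0 out with
  | nil => simpa using hinv rn
  | cons b bl ih =>
    have hS : (P.foldl (fun d p => d.modify p.2 PySem.Set.empty (fun s => PySem.Set.add s p.1)) PySem.Dict.empty).getD b.1 PySem.Set.empty
        = PySem.Set.ofList (pvRnsFor P b.1) := pvRnsByName_getD P b.1
    have hgetD : ∀ r, out.getD r [] = f0 r := by
      intro r
      rw [PySem.Dict.getD_eq_get?_getD, hinv r, pvOptIds]
      by_cases hr : f0 r = [] <;> simp [hr]
    have hinv1 : ∀ r, ((PySem.Set.ofList (pvRnsFor P b.1)).foldl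
        (fun out rn => out.modify rn [] (fun l => l ++ [b.2])) out).get? r
        = pvOptIds (f0 r ++ (if PySem.Set.contains (PySem.Set.ofList (pvRnsFor P b.1)) r then [b.2] else [])) := by
      intro r
      by_cases hm : r ∈ PySem.Set.ofList (pvRnsFor P b.1)
      · rw [pvMemB _ _ _ _ (PySem.Set.nodup_ofList _) hm, hgetD r]
        rw [if_pos ((pvSetContains_iff _ _).2 hm)]
        simp [pvOptIds]
      · rw [pvPresB _ _ _ _ hm, hinv r]
        rw [if_neg (fun hc => hm ((pvSetContains_iff _ _).1 hc))]
        simp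
    rw [List.foldl_cons, hS]
    rw [ih (fun r => f0 r ++ (if PySem.Set.contains (PySem.Set.ofList (pvRnsFor P b.1)) r then [b.2] else [])) _ hinv1]
    rw [List.filter_cons]
    by_cases hc : rn ∈ pvRnsFor P b.1
    · simp [hc, PySem.Set.contains, PySem.Set.mem_ofList]
    · simp [hc, PySem.Set.contains, PySem.Set.mem_ofList]

-- ===== VERDICT (by name: the statement is the Claim_ definition above) =====
theorem create_routing_number_mappings_spec : Claim_equal_create_routing_number_mappings := by
  intro rbn ntb _hdom
  show create_routing_number_mappings rbn ntb = create_routing_number_mappings_alt rbn ntb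
  have hitems : ((pvPairs rbn).foldl (fun banks p => banks.modify p.1 [] (fun l => l ++ [p.2])) PySem.Dict.empty).items
      = (PySem.Set.ofList ((pvPairs rbn).map (·.1))).map (fun k => (k, pvNamesFor (pvPairs rbn) k)) := by
    rw [PySem.Dict.items_eq_map_keys _ (pvBanks_nodup (pvPairs rbn)) [], pvBanks_keys]
    exact List.map_congr_left (fun k _ => by rw [pvBanks_getD])
  have hA : create_routing_number_mappings rbn ntb
      = (((PySem.Set.ofList ((pvPairs rbn).map (·.1))).map (fun k => (k, pvNamesFor (pvPairs rbn) k))).foldl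
          (fun output pr => ntb.foldl (fun output bank =>
            if pr.2.contains bank.1 then output.modify pr.1 [] (fun l => l ++ [bank.2]) else output) output)
          PySem.Dict.empty).items := by
    show (((rbn.foldl (fun banks nums =>
        nums.foldl (fun banks p => banks.modify p.1 [] (fun l => l ++ [p.2])) banks) PySem.Dict.empty).items).foldl
          (fun output pr => ntb.foldl (fun output bank =>
            if pr.2.contains bank.1 then output.modify pr.1 [] (fun l => l ++ [bank.2]) else output) output)
          PySem.Dict.empty).items = _
    rw [pvBanks_eq, hitems]
  have hB : create_routing_number_mappings_alt rbn ntb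
      = (PySem.Set.ofList ((pvPairs rbn).map (·.1))).filterMap (fun rn =>
          ((ntb.foldl (fun out bank =>
              (((pvPairs rbn).foldl (fun d p => d.modify p.2 PySem.Set.empty fun s => PySem.Set.add s p.1) PySem.Dict.empty).getD bank.1 PySem.Set.empty).foldl
                (fun out rn => out.modify rn [] fun l => l ++ [bank.2]) out) PySem.Dict.empty).get? rn).map
            (fun v => (rn, v))) := by
    show ((rbn.foldl (fun st nums =>
        nums.foldl (fun st p =>
          (st.1.modify p.2 PySem.Set.empty (fun s => PySem.Set.add s p.1), PySem.Set.add st.2 p.1)) st)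
        (PySem.Dict.empty, PySem.Set.empty)).2.filterMap (fun rn =>
          ((ntb.foldl (fun out bank =>
              ((rbn.foldl (fun st nums =>
                  nums.foldl (fun st p =>
                    (st.1.modify p.2 PySem.Set.empty (fun s => PySem.Set.add s p.1), PySem.Set.add st.2 p.1)) st)
                  (PySem.Dict.empty, PySem.Set.empty)).1.getD bank.1 PySem.Set.empty).foldl
                (fun out rn => out.modify rn [] fun l => l ++ [bank.2]) out) PySem.Dict.empty).get? rn).map
            (fun v => (rn, v)))) = _
    rw [pvStB_eq]
  rw [hA, hB]
  have hndmap : ((((PySem.Set.ofList ((pvPairs rbn).map (·.1))).map (fun k => (k, pvNamesFor (pvPairs rbn) k))).map (·.1))).Nodup := by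
    have heq : (((PySem.Set.ofList ((pvPairs rbn).map (·.1))).map (fun k => (k, pvNamesFor (pvPairs rbn) k))).map (·.1))
        = PySem.Set.ofList ((pvPairs rbn).map (·.1)) := by
      rw [List.map_map]; exact List.map_id'' (fun _ => rfl) _
    rw [heq]; exact PySem.Set.nodup_ofList _
  rw [pvOuterA ntb _ PySem.Dict.empty (fun p _ => PySem.Dict.contains_empty _) hndmap]
  have hempty : (PySem.Dict.empty : PySem.Dict String (List Int)).items = [] := rfl
  rw [hempty, List.nil_append, List.filterMap_map]
  apply List.filterMap_congr
  intro rn _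
  have hout := pvLoopB (pvPairs rbn) ntb (fun _ => []) PySem.Dict.empty
    (fun r => by rw [PySem.Dict.get?_empty]; rfl) rn
  rw [List.nil_append] at hout
  rw [Function.comp_apply, hout]
  have hids : pvIds ntb (pvNamesFor (pvPairs rbn) rn)
      = (ntb.filter (fun b => PySem.Set.contains (PySem.Set.ofList (pvRnsFor (pvPairs rbn) b.1)) rn)).map (·.2) := by
    rw [pvIds]
    congr 1
    exact List.filter_congr (fun b _ => pvMembership (pvPairs rbn) rn b.1)
  rw [hids]
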